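-- pv_equiv track=rewrite | github.com/MrBrantCode/unitest_baseline | mut_generate/mist_train_cf/cf_89513/solution.py | find_unique_names
-- ===== SOURCE A (Python) =====
-- def find_unique_names(names):
--     unique_names = []
--     for name in names:
--         if len(name) > 6:
--             is_unique = True
--             for i in range(len(name)):
--                 for j in range(i + 1, len(name)):
--                     if name[i] == name[j]:
--                         is_unique = False
--                         break
--                 if not is_unique:
--                     break
--             if is_unique:
--                 unique_names.append(name)
--     return unique_names
-- ===== SOURCE B (Python) =====
-- def find_unique_names(names):
--     unique_names = []
--     for name in names:
--         if len(name) > 6: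
--             s = sorted(name)
--             has_dup = False
--             for i in range(1, len(s)):
--                 if s[i] == s[i - 1]:
--                     has_dup = True
--                     break
--             if not has_dup:
--                 unique_names.append(name)
--     return unique_names
-- ===== Notes on version B (the rewrite author's own statement) =====
-- stated objective: faster
-- what changed: Replaces the O(k^2) nested all-pairs character scan per name with sort-then-single-linear-pass over adjacent characters.
import Mathlib
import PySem

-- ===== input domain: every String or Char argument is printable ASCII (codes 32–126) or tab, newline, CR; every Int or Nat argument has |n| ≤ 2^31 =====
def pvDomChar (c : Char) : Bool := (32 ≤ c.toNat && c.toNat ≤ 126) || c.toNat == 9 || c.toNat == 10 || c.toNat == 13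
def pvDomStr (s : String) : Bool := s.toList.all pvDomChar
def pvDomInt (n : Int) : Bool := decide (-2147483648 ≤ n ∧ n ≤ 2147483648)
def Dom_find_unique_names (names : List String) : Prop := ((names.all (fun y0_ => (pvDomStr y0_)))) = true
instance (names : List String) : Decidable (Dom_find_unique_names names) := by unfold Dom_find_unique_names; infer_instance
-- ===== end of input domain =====

-- B replaces A's nested all-pairs character scan with a sort-then-adjacent-comparison pass (objective: faster).

-- ===== PORT A =====
-- inner 'for j in range(i+1, len(name))' loop with its break: false = duplicate found
def pvAInner (cs : List Char) (i j : Nat) : Bool :=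
  if _h : j < cs.length then
    if cs.getD i ' ' == cs.getD j ' ' then false
    else pvAInner cs i (j + 1)
  else true
termination_by cs.length - j

-- outer 'for i in range(len(name))' loop with its break
def pvAOuter (cs : List Char) (i : Nat) : Bool :=
  if _h : i < cs.length then
    if pvAInner cs i (i + 1) then pvAOuter cs (i + 1) else false
  else true
termination_by cs.length - i

def find_unique_names (names : List String) : List String :=
  names.foldl (fun acc name =>
    if name.toList.length > 6 then
      if pvAOuter name.toList 0 then acc ++ [name] else acc
    else acc) []

-- ===== PORT B =====
-- 'for i in range(1, len(s)): if s[i] == s[i-1]: has_dup = True; break' — one pass over adjacent sorted chars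
def pvHasAdjDup : List Char → Bool
  | a :: b :: rest => a == b || pvHasAdjDup (b :: rest)
  | _ => false

def find_unique_names_alt (names : List String) : List String :=
  names.foldl (fun acc name =>
    if name.toList.length > 6 then
      if pvHasAdjDup (PySem.List.sorted name.toList (fun c => c) false) then acc
      else acc ++ [name]
    else acc) []

-- ===== PRECONDITION & SPEC =====
def Spec_find_unique_names (names : List String) (out : List String) : Prop := out = find_unique_names_alt names
instance (names : List String) (out : List String) : Decidable (Spec_find_unique_names names out) := by unfold Spec_find_unique_names; infer_instance

-- ===== CLAIM (what is proved, stated in full; the proofs are below) =====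
def Claim_equal_find_unique_names : Prop := ∀ (names : List String), Dom_find_unique_names names → Spec_find_unique_names names (find_unique_names names)

-- ===== LEMMAS AND PROOFS =====

lemma pvAInner_true_iff (cs : List Char) (i j : Nat) :
    pvAInner cs i j = true ↔ ∀ k, j ≤ k → k < cs.length → cs.getD i ' ' ≠ cs.getD k ' ' := by
  induction j using pvAInner.induct cs i with
  | case1 j h heq =>
    rw [pvAInner, dif_pos h, if_pos heq]
    simp only [Bool.false_eq_true, false_iff]
    intro hall
    exact hall j le_rfl h (by simpa using heq)
  | case2 j h hne ih =>
    rw [pvAInner]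
    simp only [h, dif_pos]
    rw [if_neg (by simpa using hne)]
    rw [ih]
    constructor
    · intro hall k hk hklen
      rcases Nat.eq_or_lt_of_le hk with rfl | hlt
      · simpa using hne
      · exact hall k hlt hklen
    · intro hall k hk hklen; exact hall k (Nat.le_of_succ_le hk) hklen
  | case3 j h =>
    rw [pvAInner]
    simp only [h]
    constructor
    · intro _ k hk hklen; omega
    · intro _; rfl

lemma pvAOuter_true_iff (cs : List Char) (i : Nat) :
    pvAOuter cs i = true ↔ ∀ p q, i ≤ p → p < q → q < cs.length → cs.getD p ' ' ≠ cs.getD q ' ' := by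
  induction i using pvAOuter.induct cs with
  | case1 i h hinner ih =>
    rw [pvAOuter]
    simp only [h, dif_pos, hinner, if_pos, ih]
    rw [pvAInner_true_iff] at hinner
    constructor
    · intro hall p q hip hpq hq
      rcases Nat.eq_or_lt_of_le hip with rfl | hlt
      · exact hinner q hpq hq
      · exact hall p q hlt hpq hq
    · intro hall p q hip hpq hq; exact hall p q (Nat.le_of_succ_le hip) hpq hq
  | case2 i h hinner =>
    rw [pvAOuter, dif_pos h, if_neg hinner]
    simp only [Bool.false_eq_true, false_iff]
    rw [pvAInner_true_iff] at hinner
    push Not at hinner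
    intro hall
    obtain ⟨k, hk1, hk2, hk3⟩ := hinner
    exact hall i k le_rfl hk1 hk2 hk3
  | case3 i h =>
    rw [pvAOuter]
    simp only [h]
    constructor
    · intro _ p q hip hpq hq; omega
    · intro _; rfl

lemma pvAOuter_zero_iff_nodup (cs : List Char) :
    pvAOuter cs 0 = true ↔ cs.Nodup := by
  rw [pvAOuter_true_iff, List.Nodup, List.pairwise_iff_getElem]
  constructor
  · intro h p q hp hq hpq
    have := h p q (Nat.zero_le _) hpq hq
    simpa [List.getD, List.getElem?_eq_getElem hp, List.getElem?_eq_getElem hq] using this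
  · intro h p q _ hpq hq
    have hp : p < cs.length := Nat.lt_trans hpq hq
    have := h p q hp hq hpq
    simpa [List.getD, List.getElem?_eq_getElem hp, List.getElem?_eq_getElem hq] using this

lemma pvHasAdjDup_false_iff (l : List Char) :
    pvHasAdjDup l = false ↔ l.IsChain (· ≠ ·) := by
  induction l with
  | nil => simp [pvHasAdjDup]
  | cons a t ih =>
    cases t with
    | nil => simp [pvHasAdjDup]
    | cons b r =>
      simp [pvHasAdjDup, ih, List.isChain_cons_cons]

lemma pvNodup_of_chain_sorted (l : List Char) (h1 : l.IsChain (· ≠ ·)) (h2 : l.Pairwise (· ≤ ·)) :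
    l.Nodup := by
  have hlt : l.IsChain (· < ·) := by
    have h2' : l.IsChain (· ≤ ·) := h2.isChain
    rw [List.isChain_iff_getElem] at h1 h2' ⊢
    intro i hi
    exact lt_of_le_of_ne (h2' i hi) (h1 i hi)
  exact (List.isChain_iff_pairwise.mp hlt).nodup

lemma pvHasAdjDup_sorted_iff_nodup (cs : List Char) :
    pvHasAdjDup (PySem.List.sorted cs (fun c => c) false) = false ↔ cs.Nodup := by
  rw [pvHasAdjDup_false_iff]
  have hperm : (PySem.List.sorted cs (fun c => c) false).Perm cs := PySem.List.sorted_perm ..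
  have hpw : (PySem.List.sorted cs (fun c => c) false).Pairwise (· ≤ ·) := by
    simpa using PySem.List.sorted_pairwise (xs := cs) (key := fun c => c)
  constructor
  · intro h
    exact hperm.nodup_iff.mp (pvNodup_of_chain_sorted _ h hpw)
  · intro h
    exact (hperm.nodup_iff.mpr h).isChain

-- ===== VERDICT (by name: the statement is the Claim_ definition above) =====
theorem find_unique_names_spec : Claim_equal_find_unique_names := by
  intro names _
  unfold Spec_find_unique_names find_unique_names find_unique_names_alt
  have h : (fun (acc : List String) (name : String) =>
        if name.toList.length > 6 then
          if pvAOuter name.toList 0 then acc ++ [name] else acc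
        else acc)
      = (fun (acc : List String) (name : String) =>
        if name.toList.length > 6 then
          if pvHasAdjDup (PySem.List.sorted name.toList (fun c => c) false) then acc
          else acc ++ [name]
        else acc) := by
    funext acc name
    by_cases hlen : name.toList.length > 6
    · simp only [hlen, if_pos]
      have ha := pvAOuter_zero_iff_nodup name.toList
      have hb := pvHasAdjDup_sorted_iff_nodup name.toList
      cases hA : pvAOuter name.toList 0 <;>
        cases hB : pvHasAdjDup (PySem.List.sorted name.toList (fun c => c) false) <;>
        simp_all
    · simp only [if_neg hlen]
  rw [h]
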